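-- pv_equiv track=rewrite | github.com/tnakaicode/jburkardt-python | prob/i4_is_power_of_10.py | i4_is_power_of_10
-- ===== SOURCE A (Python) =====
-- def i4_is_power_of_10 ( n ):
--
-- #*****************************************************************************80
-- #
-- ## I4_IS_POWER_OF_10 reports whether an integer is a power of 10.
-- #
-- #  Discussion:
-- #
-- #    The powers of 10 are 1, 10, 100, 1000, 10000, and so on.
-- #
-- #  Licensing:
-- #
-- #    This code is distributed under the GNU LGPL license.
-- #
-- #  Modified:
-- #
-- #    03 March 2016
-- #
-- #  Author:
-- #
-- #    John Burkardt
-- #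
-- #  Parameters:
-- #
-- #    Input, integer N, the integer to be tested.
-- #
-- #    Output, logical VALUE, is TRUE if N is a power of 10.
-- #
--   value = False
--
--   if ( n <= 0 ):
--     return value
--
--   while ( 1 < n ):
--
--     if ( ( n % 10 ) != 0 ):
--       return value
--
--     n = n // 10
--
--   value = True
--
--   return value
-- ===== SOURCE B (Python) =====
-- def i4_is_power_of_10(n):
--     # Search upward: find the smallest power of 10 that is >= n, then compare.
--     if n <= 0:
--         return False
--     k = 0
--     while 10 ** k < n:
--         k = k + 1
--     return 10 ** k == n
-- ===== Notes on version B (the rewrite author's own statement) =====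
-- stated objective: alternative
-- what changed: Instead of repeatedly peeling trailing digits with modulus and floor division, B searches upward through the powers of ten for the smallest one that is at least n and returns whether it equals n.
import Mathlib
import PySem

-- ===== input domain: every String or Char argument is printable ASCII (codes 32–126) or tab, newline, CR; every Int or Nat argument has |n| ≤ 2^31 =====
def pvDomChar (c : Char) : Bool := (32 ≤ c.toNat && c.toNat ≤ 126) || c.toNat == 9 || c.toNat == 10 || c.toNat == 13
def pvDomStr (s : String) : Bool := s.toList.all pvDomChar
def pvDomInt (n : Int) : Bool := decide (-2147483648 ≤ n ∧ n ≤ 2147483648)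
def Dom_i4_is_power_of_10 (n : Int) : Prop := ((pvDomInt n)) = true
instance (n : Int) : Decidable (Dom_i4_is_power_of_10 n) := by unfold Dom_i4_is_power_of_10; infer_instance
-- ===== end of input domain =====

-- B replaces A's downward digit-peeling (n%10, n//10) by an upward search for the
-- smallest power of 10 ≥ n; same result, a genuinely different traversal (alternative).

-- ===== PORT A =====
-- the 'while 1 < n' loop of A: peel a trailing zero each round
def i4Pow10LoopA (n : Int) : Bool :=
  if 1 < n then
    if PySem.Int.mod n 10 ≠ 0 then false
    else i4Pow10LoopA (PySem.Int.floordiv n 10)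
  else true
termination_by n.toNat
decreasing_by
  rw [PySem.Int.floordiv_eq_ediv_of_pos (by omega : (0:Int) < 10)]
  omega

def i4_is_power_of_10 (n : Int) : Bool :=
  -- value = False; if n <= 0: return value
  if n ≤ 0 then false
  else i4Pow10LoopA n

-- ===== PORT B =====
-- the 'while 10 ** k < n' loop of B: find the smallest power of 10 ≥ n
def i4Pow10LoopB (k : Nat) (n : Int) : Bool :=
  if h : (10:Int) ^ k < n then i4Pow10LoopB (k + 1) n
  else decide ((10:Int) ^ k = n)
termination_by (n - (10:Int) ^ k).toNat
decreasing_by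
  have h10 : (10:Int) ^ k < 10 ^ (k + 1) := by
    have hp := pow_pos (by omega : (0:Int) < 10) k
    calc (10:Int) ^ k < 10 ^ k * 10 := by omega
      _ = 10 ^ (k + 1) := by rw [pow_succ]
  omega

def i4_is_power_of_10_alt (n : Int) : Bool :=
  if n ≤ 0 then false
  else i4Pow10LoopB 0 n

-- ===== PRECONDITION & SPEC =====
def Spec_i4_is_power_of_10 (n : Int) (out : Bool) : Prop := out = i4_is_power_of_10_alt n
instance (n : Int) (out : Bool) : Decidable (Spec_i4_is_power_of_10 n out) := by unfold Spec_i4_is_power_of_10; infer_instance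

-- ===== CLAIM (what is proved, stated in full; the proofs are below) =====
def Claim_equal_i4_is_power_of_10 : Prop := ∀ (n : Int), Dom_i4_is_power_of_10 n → Spec_i4_is_power_of_10 n (i4_is_power_of_10 n)

-- ===== LEMMAS AND PROOFS =====

-- A's loop decides membership in the powers of 10 (for positive n).
theorem i4Pow10LoopA_iff (m : Nat) : ∀ n : Int, n.toNat ≤ m → 0 < n →
    (i4Pow10LoopA n = true ↔ ∃ k : Nat, n = (10:Int) ^ k) := by
  induction m with
  | zero => intro n hm hn; omega
  | succ m ih =>
    intro n hm hn
    rw [i4Pow10LoopA]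
    by_cases h1 : 1 < n
    · simp only [if_pos h1]
      by_cases hmod : PySem.Int.mod n 10 = 0
      · have hdvd : (10:Int) ∣ n := (PySem.Int.mod_eq_zero_iff_dvd n 10).mp hmod
        obtain ⟨q, hq⟩ := hdvd
        have hdiv : PySem.Int.floordiv n 10 = q := by
          rw [PySem.Int.floordiv_eq_ediv_of_pos (by omega : (0:Int) < 10), hq]
          rw [Int.mul_ediv_cancel_left _ (by omega : (10:Int) ≠ 0)]
        have hq_pos : 0 < q := by nlinarith
        have hrec := ih q (by omega) hq_pos
        simp only [hmod, ne_eq, not_true_eq_false, if_false, hdiv, hrec]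
        constructor
        · rintro ⟨k, hk⟩
          exact ⟨k + 1, by rw [hq, hk, pow_succ]; ring⟩
        · rintro ⟨k, hk⟩
          match k with
          | 0 => omega
          | k + 1 =>
            refine ⟨k, ?_⟩
            have : (10:Int) * q = 10 * 10 ^ k := by
              rw [← hq, hk, pow_succ]; ring
            omega
      · simp only [hmod, ne_eq, not_false_eq_true, if_true]
        constructor
        · intro h; cases h
        · rintro ⟨k, hk⟩
          match k with
          | 0 => omega
          | k + 1 =>
            exfalso; apply hmod
            rw [PySem.Int.mod_eq_zero_iff_dvd]
            exact ⟨10 ^ k, by rw [hk, pow_succ]; ring⟩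
    · simp only [if_neg h1]
      have hn1 : n = 1 := by omega
      exact ⟨fun _ => ⟨0, by omega⟩, fun _ => by simp⟩

-- B's loop decides membership in the powers of 10 with exponent ≥ k.
theorem i4Pow10LoopB_iff (m : Nat) : ∀ (k : Nat) (n : Int), (n - (10:Int) ^ k).toNat ≤ m →
    (i4Pow10LoopB k n = true ↔ ∃ j : Nat, k ≤ j ∧ n = (10:Int) ^ j) := by
  induction m with
  | zero =>
    intro k n hm
    rw [i4Pow10LoopB]
    have hnk : ¬ ((10:Int) ^ k < n) := by omega
    simp only [dif_neg hnk, decide_eq_true_eq]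
    constructor
    · intro h; exact ⟨k, le_refl k, h.symm⟩
    · rintro ⟨j, hkj, hj⟩
      have : (10:Int) ^ j ≤ 10 ^ k := by omega
      have hjk : j ≤ k := by
        by_contra hc
        have : (10:Int) ^ k < 10 ^ j :=
          pow_lt_pow_right₀ (by omega : (1:Int) < 10) (by omega)
        omega
      have : j = k := le_antisymm hjk hkj
      rw [hj, this]
  | succ m ih =>
    intro k n hm
    rw [i4Pow10LoopB]
    by_cases h : (10:Int) ^ k < n
    · simp only [dif_pos h]
      have hstep : (10:Int) ^ k < 10 ^ (k + 1) := by
        have := pow_pos (by omega : (0:Int) < 10) k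
        calc (10:Int) ^ k < 10 ^ k * 10 := by omega
          _ = 10 ^ (k + 1) := by rw [pow_succ]
      rw [ih (k + 1) n (by omega)]
      constructor
      · rintro ⟨j, hkj, hj⟩; exact ⟨j, by omega, hj⟩
      · rintro ⟨j, hkj, hj⟩
        refine ⟨j, ?_, hj⟩
        rcases Nat.eq_or_lt_of_le hkj with heq | hlt
        · exfalso; rw [hj, ← heq] at h; omega
        · omega
    · simp only [dif_neg h, decide_eq_true_eq]
      constructor
      · intro hh; exact ⟨k, le_refl k, hh.symm⟩
      · rintro ⟨j, hkj, hj⟩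
        have hjk : j ≤ k := by
          by_contra hc
          have : (10:Int) ^ k < 10 ^ j :=
            pow_lt_pow_right₀ (by omega : (1:Int) < 10) (by omega)
          omega
        have : j = k := le_antisymm hjk hkj
        rw [hj, this]

-- ===== VERDICT (by name: the statement is the Claim_ definition above) =====
theorem i4_is_power_of_10_spec : Claim_equal_i4_is_power_of_10 := by
  intro n _
  unfold Spec_i4_is_power_of_10 i4_is_power_of_10 i4_is_power_of_10_alt
  by_cases hn : n ≤ 0
  · simp [hn]
  · simp only [if_neg hn]
    have hA := i4Pow10LoopA_iff n.toNat n (le_refl _) (by omega)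
    have hB := i4Pow10LoopB_iff (n - 1).toNat 0 n (by omega)
    rw [Bool.eq_iff_iff, hA, hB]
    constructor
    · rintro ⟨k, hk⟩; exact ⟨k, Nat.zero_le k, hk⟩
    · rintro ⟨j, _, hj⟩; exact ⟨j, hj⟩
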